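-- pv_equiv track=rewrite | github.com/JMCD2000/2017_learning | jmAverageWordCount.py | getCountStats
-- ===== SOURCE A (Python) =====
-- def getCountStats(myContents):
--     """ getCountStats -> line count as int, word count as int
--     Perform the line and word counts """
--
--     # Initialize My Variables #
--     countLine = 1 #correcting for EOF
--     countWord = 0
--
--     #loop through the lines and words to count totals
--     for myChar in myContents:
--         #look for \n or space in the file string
--         if myChar == '\n':
--             countLine = countLine + 1
--         elif myChar == ' ':
--             countWord = countWord + 1
--         elif myChar == '\s':
--             countWord = countWord + 1
--         elif myChar == 'EOF':
--             countLine = countLine + 1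
--         else:
--             #should be a char in a word, keep going
--             pass
--
--     #return line and word counts
--     return countLine, countWord
-- ===== SOURCE B (Python) =====
-- def getCountStats(myContents):
--     # Partition the text instead of scanning char-by-char: the number of
--     # newline-separated pieces is the line count, and the number of
--     # space-separated pieces minus one is the word count.
--     return (len(myContents.split('\n')), len(myContents.split(' ')) - 1)
-- ===== Notes on version B (the rewrite author's own statement) =====
-- stated objective: idiomatic
-- what changed: B partitions the string with str.split on newline and on space and derives both counts from the number of pieces, replacing A's per-character if/elif accumulator loop.
import Mathlib
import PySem

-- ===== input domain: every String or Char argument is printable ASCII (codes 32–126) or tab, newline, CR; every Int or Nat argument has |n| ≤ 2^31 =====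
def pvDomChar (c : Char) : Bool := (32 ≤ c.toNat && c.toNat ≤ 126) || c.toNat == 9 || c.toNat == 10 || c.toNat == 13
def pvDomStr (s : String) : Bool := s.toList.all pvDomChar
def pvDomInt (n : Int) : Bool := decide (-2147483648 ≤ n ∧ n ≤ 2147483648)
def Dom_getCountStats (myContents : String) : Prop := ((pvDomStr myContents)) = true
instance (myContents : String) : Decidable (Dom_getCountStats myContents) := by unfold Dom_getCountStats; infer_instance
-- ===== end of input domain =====

-- B derives both counts from the pieces of str.split('\n') / str.split(' ')
-- instead of A's per-character if/elif accumulator loop (idiomatic; same O(n)).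


-- ===== PORT A =====
-- A iterates the string's characters; each Python `myChar` is a length-1 string,
-- so the comparisons against the multi-character literals '\s' (= "\\s") and
-- 'EOF' are ported as (always-false) singleton-list comparisons, exactly as
-- Python evaluates them.
def stepA (st : Int × Int) (myChar : Char) : Int × Int :=
  if myChar == '\n' then (st.1 + 1, st.2)
  else if myChar == ' ' then (st.1, st.2 + 1)
  else if [myChar] == ['\\', 's'] then (st.1, st.2 + 1)
  else if [myChar] == ['E', 'O', 'F'] then (st.1 + 1, st.2)
  else st

def getCountStats (myContents : String) : Int × Int :=
  myContents.toList.foldl stepA (1, 0)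

-- ===== PORT B =====
-- Python's s.split(sep) for nonempty sep is PySem.Chars.splitOn on the
-- character list (Str.split? with a nonempty separator); len(...) is .length.
def getCountStats_alt (myContents : String) : Int × Int :=
  ((PySem.Chars.splitOn myContents.toList ['\n']).length,
   ((PySem.Chars.splitOn myContents.toList [' ']).length : Int) - 1)

-- ===== PRECONDITION & SPEC =====
def Spec_getCountStats (myContents : String) (out : Int × Int) : Prop := out = getCountStats_alt myContents
instance (myContents : String) (out : Int × Int) : Decidable (Spec_getCountStats myContents out) := by unfold Spec_getCountStats; infer_instance

-- ===== CLAIM =====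
def Claim_equal_getCountStats : Prop := ∀ (myContents : String), Dom_getCountStats myContents → Spec_getCountStats myContents (getCountStats myContents)

-- ===== LEMMAS AND PROOFS =====

theorem stepA_eq (st : Int × Int) (c : Char) :
    stepA st c = if c = '\n' then (st.1 + 1, st.2)
      else if c = ' ' then (st.1, st.2 + 1) else st := by
  unfold stepA
  rcases st with ⟨l, w⟩
  by_cases h1 : c = '\n' <;> by_cases h2 : c = ' ' <;> simp [h1, h2]

theorem foldA_eq_counts (cs : List Char) (l w : Int) :
    cs.foldl stepA (l, w) = (l + cs.count '\n', w + cs.count ' ') := by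
  induction cs generalizing l w with
  | nil => simp
  | cons c cs ih =>
    rw [List.foldl_cons, stepA_eq]
    by_cases h1 : c = '\n'
    · subst h1
      simp only [ih, List.count_cons]
      simp; ring
    · by_cases h2 : c = ' '
      · subst h2
        simp only [h1, ih, List.count_cons, if_false]
        simp; ring
      · simp [h1, h2, ih]

-- splitting on a single-character separator yields (count + 1) pieces
theorem splitOn_go_length (d : Char) (fuel : Nat) (l cur : List Char)
    (acc : List (List Char)) (h : l.length < fuel) :
    (PySem.Chars.splitOn.go [d] fuel l cur acc).length
      = acc.length + l.count d + 1 := by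
  induction fuel generalizing l cur acc with
  | zero => omega
  | succ f ih =>
    cases l with
    | nil => simp [PySem.Chars.splitOn.go]
    | cons c rest =>
      simp only [PySem.Chars.splitOn.go]
      by_cases hc : d = c
      · subst hc
        rw [if_pos (by simp [List.isPrefixOf])]
        simp only [List.length_singleton, List.drop_succ_cons, List.drop_zero]
        rw [ih rest [] _ (by simp at h; omega)]
        simp
        omega
      · rw [if_neg (by simp [List.isPrefixOf]; intro h'; subst h'; exact hc rfl)]
        rw [ih _ _ _ (by simp at h; omega)]
        simp
        rw [List.count_cons_of_ne (Ne.symm hc)]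

theorem splitOn_single_length (cs : List Char) (d : Char) :
    (PySem.Chars.splitOn cs [d]).length = cs.count d + 1 := by
  unfold PySem.Chars.splitOn
  rw [splitOn_go_length d _ _ _ _ (by omega)]
  simp

-- ===== VERDICT =====
theorem getCountStats_spec : Claim_equal_getCountStats := by
  intro s _
  show getCountStats s = getCountStats_alt s
  unfold getCountStats getCountStats_alt
  rw [foldA_eq_counts, splitOn_single_length, splitOn_single_length]
  rw [Prod.mk.injEq]
  constructor <;> push_cast <;> ring
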